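-- pv_equiv track=rewrite | github.com/Gexeg/lessons | Binary Welded Tree.py | choose_best_way
-- ===== SOURCE A (Python) =====
-- def choose_best_way(ways, desired_color):
--     count_desired_colors = []
--     for path_and_colors in ways:
--         color_counter = 0
--         for color in path_and_colors[1]:
--             if color == desired_color:
--                 color_counter +=1
--         count_desired_colors.append(color_counter)
--     return ways[count_desired_colors.index(min(count_desired_colors))]
-- ===== SOURCE B (Python) =====
-- def choose_best_way(ways, desired_color):
--     best_way = ways[0]
--     best_count = best_way[1].count(desired_color)
--     for way in ways[1:]:
--         c = way[1].count(desired_color)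
--         if c < best_count:
--             best_way, best_count = way, c
--     return best_way
-- ===== Notes on version B (the rewrite author's own statement) =====
-- stated objective: idiomatic
-- what changed: Replaces A's two-phase build-a-counts-list-then-index(min) with a single streaming argmin pass keeping the running best way and its count (strict '<' so the first minimum wins), using list.count for the inner tally.
-- outside the precondition, e.g. on choose_best_way([], 'r'): A raises ValueError, B raises IndexError
import Mathlib
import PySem

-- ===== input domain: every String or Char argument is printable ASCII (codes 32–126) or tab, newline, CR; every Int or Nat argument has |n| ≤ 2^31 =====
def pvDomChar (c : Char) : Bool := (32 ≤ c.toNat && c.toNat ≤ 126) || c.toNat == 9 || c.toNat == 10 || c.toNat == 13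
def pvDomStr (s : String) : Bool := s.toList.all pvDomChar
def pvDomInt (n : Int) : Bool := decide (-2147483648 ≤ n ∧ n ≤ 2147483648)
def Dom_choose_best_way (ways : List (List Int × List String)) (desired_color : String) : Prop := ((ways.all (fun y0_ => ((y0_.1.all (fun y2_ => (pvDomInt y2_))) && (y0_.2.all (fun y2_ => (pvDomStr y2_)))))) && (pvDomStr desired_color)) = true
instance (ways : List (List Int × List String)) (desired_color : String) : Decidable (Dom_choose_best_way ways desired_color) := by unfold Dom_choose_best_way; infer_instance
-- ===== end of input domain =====

-- B replaces A's build-counts-list-then-index(min) with a single streaming argmin pass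
-- (strict '<' so the first minimum wins); objective: idiomatic. Return-value equivalence only.

-- ===== PORT A =====
def choose_best_way (ways : List (List Int × List String)) (desired_color : String) : List Int × List String :=
  let count_desired_colors : List Int :=
    ways.foldl (fun acc path_and_colors =>
      acc ++ [path_and_colors.2.foldl
        (fun color_counter color => if color = desired_color then color_counter + 1 else color_counter)
        (0 : Int)]) []
  match PySem.List.min? count_desired_colors (fun x => x) with
  | none => ([], [])        -- min([]) raises ValueError: outside Pre_
  | some m =>
    match PySem.List.index? count_desired_colors m with
    | none => ([], [])      -- unreachable (m is a member)
    | some i => (PySem.List.pyGet? ways (i : Int)).getD ([], [])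

-- ===== PORT B =====
def choose_best_way_alt (ways : List (List Int × List String)) (desired_color : String) : List Int × List String :=
  match ways with
  | [] => ([], [])          -- ways[0] raises IndexError: outside Pre_
  | first :: _ =>
    ((PySem.List.slice ways (some 1) none).foldl
      (fun b way =>
        let c : Int := (PySem.List.count way.2 desired_color : Int)
        if c < b.2 then (way, c) else b)
      (first, ((PySem.List.count first.2 desired_color : Int)))).1

-- ===== PRECONDITION & SPEC =====
-- Pre_ excludes only the empty list of ways, on which A raises ValueError (min of empty sequence).
def Pre_choose_best_way (ways : List (List Int × List String)) (desired_color : String) : Prop := ways ≠ []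
instance (ways : List (List Int × List String)) (desired_color : String) : Decidable (Pre_choose_best_way ways desired_color) := by unfold Pre_choose_best_way; infer_instance
def pvWitness_choose_best_way : (List (List Int × List String)) × String := ([([1, 2], ["r", "g"]), ([3], ["g"])], "r")

def Spec_choose_best_way (ways : List (List Int × List String)) (desired_color : String) (out : List Int × List String) : Prop := out = choose_best_way_alt ways desired_color
instance (ways : List (List Int × List String)) (desired_color : String) (out : List Int × List String) : Decidable (Spec_choose_best_way ways desired_color out) := by unfold Spec_choose_best_way; infer_instance

-- ===== CLAIM (what is proved, stated in full; the proofs are below) =====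
def Claim_equal_choose_best_way : Prop := ∀ (ways : List (List Int × List String)) (desired_color : String), Dom_choose_best_way ways desired_color → Pre_choose_best_way ways desired_color → Spec_choose_best_way ways desired_color (choose_best_way ways desired_color)

-- ===== LEMMAS AND PROOFS =====

-- the per-way key both programs minimise: number of occurrences of the desired color
def pvKey (d : String) (p : List Int × List String) : Int := (p.2.count d : Int)

-- first element whose key equals m
def pvFirstWith (d : String) (m : Int) : List (List Int × List String) → Option (List Int × List String)
  | [] => none
  | a :: l => if pvKey d a = m then some a else pvFirstWith d m l

-- A's inner counting loop computes the key
theorem pvCount_eq (d : String) (colors : List String) :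
    colors.foldl (fun c col => if col = d then c + 1 else c) (0 : Int) = (colors.count d : Int) := by
  rw [PySem.List.foldl_ite_add_one (fun col => col = d)]
  have hb : ∀ x : String, decide (x = d) = (x == d) := fun x => by by_cases hx : x = d <;> simp [hx]
  simp [List.count, List.countP_eq_length_filter, hb]

theorem pvFoldlMin_le (l : List Int) (a : Int) : l.foldl min a ≤ a :=
  (PySem.List.foldl_min_le l a).1

-- A's index(min(counts)) picks the first element with minimal key
theorem pvIndex_first (d : String) (m : Int) : ∀ (ws : List (List Int × List String)),
    (match PySem.List.index? (ws.map (pvKey d)) m with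
     | none => none
     | some i => ws[i]?) = pvFirstWith d m ws := by
  intro ws
  induction ws with
  | nil => simp [pvFirstWith, PySem.List.index?_eq_idxOf?]
  | cons a l ih =>
    by_cases h : pvKey d a = m
    · rw [List.map_cons, h, PySem.List.index?_cons_self]
      simp [pvFirstWith, h]
    · rw [List.map_cons, PySem.List.index?_cons_of_ne _ h]
      rw [pvFirstWith, if_neg h, ← ih]
      cases PySem.List.index? (l.map (pvKey d)) m with
      | none => simp
      | some i => simp

-- B's streaming pass computes the first element achieving the running minimum
-- firstWith of a member-min is some
theorem pvFirstWith_isSome (d : String) (m : Int) (ws : List (List Int × List String))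
    (hm : m ∈ ws.map (pvKey d)) : (pvFirstWith d m ws).isSome := by
  induction ws with
  | nil => simp at hm
  | cons a l ih =>
    rw [pvFirstWith]
    by_cases h : pvKey d a = m
    · simp [h]
    · rw [if_neg h]
      apply ih
      simp at hm
      rcases hm with h1 | h1
      · exact absurd h1.symm h
      · simpa using h1


theorem pvGetD_eq {α : Type} (o : Option α) (h : o.isSome) (x y : α) : o.getD x = o.getD y := by
  cases o with
  | none => simp at h
  | some v => rfl

theorem pvArgmin (d : String) : ∀ (l : List (List Int × List String)) (w : List Int × List String),
    l.foldl (fun b way => if pvKey d way < b.2 then (way, pvKey d way) else b) (w, pvKey d w)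
      = (((pvFirstWith d ((l.map (pvKey d)).foldl min (pvKey d w)) (w :: l)).getD w),
         (l.map (pvKey d)).foldl min (pvKey d w)) := by
  intro l
  induction l with
  | nil => intro w; simp [pvFirstWith]
  | cons a l ih =>
    intro w
    rw [List.foldl_cons]
    by_cases h : pvKey d a < pvKey d w
    · show List.foldl _ (if pvKey d a < pvKey d w then (a, pvKey d a) else (w, pvKey d w)) l = _
      rw [if_pos h, ih a]
      have hmin : min (pvKey d w) (pvKey d a) = pvKey d a := by omega
      have hM : (l.map (pvKey d)).foldl min (pvKey d a) ≤ pvKey d a := pvFoldlMin_le _ _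
      simp only [List.map_cons, List.foldl_cons, hmin]
      rw [show pvFirstWith d ((l.map (pvKey d)).foldl min (pvKey d a)) (w :: a :: l)
            = pvFirstWith d ((l.map (pvKey d)).foldl min (pvKey d a)) (a :: l) from by
        rw [pvFirstWith, if_neg (by omega)]]
      have hsome : (pvFirstWith d ((l.map (pvKey d)).foldl min (pvKey d a)) (a :: l)).isSome := by
        apply pvFirstWith_isSome
        rcases PySem.List.foldl_min_mem (l.map (pvKey d)) (pvKey d a) with h1 | h1 <;>
          simp [List.map_cons, h1]
      rw [pvGetD_eq _ hsome a w]
    · show List.foldl _ (if pvKey d a < pvKey d w then (a, pvKey d a) else (w, pvKey d w)) l = _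
      rw [if_neg h, ih w]
      have hmin : min (pvKey d w) (pvKey d a) = pvKey d w := by omega
      have hM : (l.map (pvKey d)).foldl min (pvKey d w) ≤ pvKey d w := pvFoldlMin_le _ _
      simp only [List.map_cons, List.foldl_cons, hmin]
      by_cases hw : pvKey d w = (l.map (pvKey d)).foldl min (pvKey d w)
      · rw [show pvFirstWith d ((l.map (pvKey d)).foldl min (pvKey d w)) (w :: a :: l) = some w from by
            rw [pvFirstWith, if_pos hw],
          show pvFirstWith d ((l.map (pvKey d)).foldl min (pvKey d w)) (w :: l) = some w from by
            rw [pvFirstWith, if_pos hw]]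
      · have hlt : (l.map (pvKey d)).foldl min (pvKey d w) < pvKey d w :=
          lt_of_le_of_ne hM (fun hc => hw hc.symm)
        rw [show pvFirstWith d ((l.map (pvKey d)).foldl min (pvKey d w)) (w :: a :: l)
              = pvFirstWith d ((l.map (pvKey d)).foldl min (pvKey d w)) l from by
            rw [pvFirstWith, if_neg (by omega), pvFirstWith, if_neg (by omega)],
          show pvFirstWith d ((l.map (pvKey d)).foldl min (pvKey d w)) (w :: l)
              = pvFirstWith d ((l.map (pvKey d)).foldl min (pvKey d w)) l from by
            rw [pvFirstWith, if_neg (by omega)]]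

-- ===== VERDICT (by name: the statement is the Claim_ definition above) =====
theorem choose_best_way_spec : Claim_equal_choose_best_way := by
  intro ways d _ hpre
  unfold Spec_choose_best_way choose_best_way choose_best_way_alt
  cases ways with
  | nil => exact absurd rfl hpre
  | cons w l =>
    simp only [PySem.List.slice_from_one, List.tail_cons]
    have hfun : (fun (b : (List Int × List String) × Int) way =>
        let c : Int := (PySem.List.count way.2 d : Int)
        if c < b.2 then (way, c) else b)
      = (fun b way => if pvKey d way < b.2 then (way, pvKey d way) else b) := by
      funext b way
      simp [pvKey, PySem.List.count_eq]
    have hinit : ((w, ((PySem.List.count w.2 d : Int))) : (List Int × List String) × Int)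
        = (w, pvKey d w) := by simp [pvKey, PySem.List.count_eq]
    rw [hfun, hinit, pvArgmin d l w]
    have hcounts : (w :: l).foldl (fun acc p =>
        acc ++ [p.2.foldl (fun c col => if col = d then c + 1 else c) (0 : Int)]) [] = (w :: l).map (pvKey d) := by
      rw [PySem.List.foldl_append_singleton_eq_map]
      simp only [List.nil_append]
      apply List.map_congr_left
      intro p _
      rw [pvCount_eq]
      rfl
    simp only [hcounts]
    have hM : PySem.List.min? ((w :: l).map (pvKey d)) (fun x => x)
        = some ((l.map (pvKey d)).foldl min (pvKey d w)) := by
      rw [List.map_cons, PySem.List.min?_id_cons]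
    rw [hM]
    set M := (l.map (pvKey d)).foldl min (pvKey d w) with hMdef
    have hmem : M ∈ (w :: l).map (pvKey d) :=
      PySem.List.min?_mem (xs := (w :: l).map (pvKey d)) (key := fun x => x) hM
    have hfw := pvIndex_first d M (w :: l)
    have hsome := pvFirstWith_isSome d M (w :: l) hmem
    show (match PySem.List.index? ((w :: l).map (pvKey d)) M with
          | none => (([], []) : List Int × List String)
          | some i => (PySem.List.pyGet? (w :: l) (i : Int)).getD ([], []))
        = (pvFirstWith d M (w :: l)).getD w
    cases hidx : PySem.List.index? ((w :: l).map (pvKey d)) M with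
    | none =>
      rw [hidx] at hfw
      simp only at hfw
      rw [← hfw] at hsome
      simp at hsome
    | some i =>
      rw [hidx] at hfw
      simp only at hfw
      show (PySem.List.pyGet? (w :: l) (i : Int)).getD ([], []) = _
      rw [PySem.List.pyGet?_natCast, hfw]
      cases hf : pvFirstWith d M (w :: l) with
      | none => rw [hf] at hsome; simp at hsome
      | some x => simp
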